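-- pv_equiv track=rewrite | github.com/pypi-data/pypi-mirror-356 | packages/aetherpost/aetherpost-1.2.0-py3-none-any.whl/aetherpost/plugins/connectors/instagram/connector.py | _generate_instagram_hashtags
-- ===== SOURCE A (Python) =====
-- from typing import Dict, Any, Optional, List
--
-- def _generate_instagram_hashtags(text: str) -> List[str]:
--     """Instagram向けハッシュタグ生成."""
--
--     # テック関連の人気ハッシュタグ
--     tech_hashtags = [
--         '#programming', '#coding', '#developer', '#tech', '#software',
--         '#webdev', '#javascript', '#python', '#react', '#nodejs',
--         '#opensource', '#github', '#startup', '#innovation', '#ai',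
--         '#machinelearning', '#devlife', '#coder', '#codinglife'
--     ]
--
--     # 日本語ハッシュタグ
--     jp_hashtags = [
--         '#プログラミング', '#エンジニア', '#開発', '#テック', '#IT',
--         '#スタートアップ', '#技術', '#コーディング', '#ウェブ開発'
--     ]
--
--     # 一般的なエンゲージメント向上ハッシュタグ
--     engagement_hashtags = [
--         '#instagood', '#photooftheday', '#follow', '#like4like',
--         '#instadaily', '#picoftheday', '#amazing', '#awesome'
--     ]
--
--     # テキスト内容に基づいて選択
--     selected_hashtags = []
--
--     # テック関連キーワードをチェック
--     text_lower = text.lower()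
--     for hashtag in tech_hashtags:
--         if any(keyword in text_lower for keyword in [
--             'code', 'program', 'develop', 'tech', 'software', 'web', 'app'
--         ]):
--             selected_hashtags.append(hashtag)
--             if len(selected_hashtags) >= 10:
--                 break
--
--     # 日本語ハッシュタグ追加
--     selected_hashtags.extend(jp_hashtags[:5])
--
--     # エンゲージメント向上ハッシュタグ追加
--     selected_hashtags.extend(engagement_hashtags[:5])
--
--     # Instagram制限（30個まで）を考慮
--     return selected_hashtags[:25]  # 余裕を持って25個まで
-- ===== SOURCE B (Python) =====
-- from typing import List
--
-- TECH_HASHTAGS = [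
--     '#programming', '#coding', '#developer', '#tech', '#software',
--     '#webdev', '#javascript', '#python', '#react', '#nodejs',
--     '#opensource', '#github', '#startup', '#innovation', '#ai',
--     '#machinelearning', '#devlife', '#coder', '#codinglife'
-- ]
--
-- JP_HASHTAGS = [
--     '#プログラミング', '#エンジニア', '#開発', '#テック', '#IT',
--     '#スタートアップ', '#技術', '#コーディング', '#ウェブ開発'
-- ]
--
-- ENGAGEMENT_HASHTAGS = [
--     '#instagood', '#photooftheday', '#follow', '#like4like',
--     '#instadaily', '#picoftheday', '#amazing', '#awesome'
-- ]
--
-- KEYWORDS = ['code', 'program', 'develop', 'tech', 'software', 'web', 'app']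
--
--
-- def _generate_instagram_hashtags(text: str) -> List[str]:
--     """Single left-to-right scan: at each position check whether some keyword
--     starts there, returning as soon as one match is found."""
--     t = text.lower()
--     base = JP_HASHTAGS[:5] + ENGAGEMENT_HASHTAGS[:5]
--     for i in range(len(t)):
--         if any(t.startswith(kw, i) for kw in KEYWORDS):
--             return (TECH_HASHTAGS[:10] + base)[:25]
--     return base[:25]
-- ===== Notes on version B (the rewrite author's own statement) =====
-- stated objective: alternative
-- what changed: A's per-hashtag loop repeating up to ten keyword substring-containment searches is replaced by one manual multi-pattern scan: a single left-to-right pass over text positions testing startswith for each keyword, with an early return building the result from pre-sliced lists.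
import Mathlib
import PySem

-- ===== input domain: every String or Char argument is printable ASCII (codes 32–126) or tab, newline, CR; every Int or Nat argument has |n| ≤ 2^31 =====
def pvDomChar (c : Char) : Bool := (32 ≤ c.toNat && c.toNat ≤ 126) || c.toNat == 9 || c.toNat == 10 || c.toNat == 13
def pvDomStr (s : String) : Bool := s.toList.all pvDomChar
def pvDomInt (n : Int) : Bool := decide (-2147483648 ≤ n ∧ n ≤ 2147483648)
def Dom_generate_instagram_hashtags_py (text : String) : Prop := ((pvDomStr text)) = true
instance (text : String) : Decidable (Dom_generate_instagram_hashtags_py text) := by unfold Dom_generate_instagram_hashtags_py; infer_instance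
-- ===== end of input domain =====

-- B replaces A's per-hashtag loop (which repeats the 'keyword in text' substring searches)
-- by one left-to-right positional scan testing startswith at each position; objective: alternative.

-- shared literal data (the three hashtag lists and the keyword list of the Python sources)
def pvTech : List String :=
  ["#programming", "#coding", "#developer", "#tech", "#software",
   "#webdev", "#javascript", "#python", "#react", "#nodejs",
   "#opensource", "#github", "#startup", "#innovation", "#ai",
   "#machinelearning", "#devlife", "#coder", "#codinglife"]

def pvJp : List String :=
  ["#プログラミング", "#エンジニア", "#開発", "#テック", "#IT",
   "#スタートアップ", "#技術", "#コーディング", "#ウェブ開発"]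

def pvEng : List String :=
  ["#instagood", "#photooftheday", "#follow", "#like4like",
   "#instadaily", "#picoftheday", "#amazing", "#awesome"]

def pvKeys : List String :=
  ["code", "program", "develop", "tech", "software", "web", "app"]

-- ===== PORT A =====
-- the 'for hashtag in tech_hashtags' loop: append when the keyword test holds, break at length 10
def pvLoopA (tl : String) : List String → List String → List String
  | [], acc => acc
  | h :: rest, acc =>
    if pvKeys.any (fun kw => PySem.Str.isIn kw tl) then
      let acc' := acc ++ [h]
      if 10 ≤ acc'.length then acc' else pvLoopA tl rest acc'
    else pvLoopA tl rest acc

def generate_instagram_hashtags_py (text : String) : List String :=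
  let tl := PySem.Str.lower text
  let selected := pvLoopA tl pvTech []
  let selected := selected ++ PySem.List.slice pvJp none (some 5)
  let selected := selected ++ PySem.List.slice pvEng none (some 5)
  PySem.List.slice selected none (some 25)

-- ===== PORT B =====
-- the 'for i in range(len(t))' loop: does any keyword start at the current position?
-- (one char is consumed per step, so recursion on the suffix = the index loop)
def pvScanB : List Char → Bool
  | [] => false
  | c :: rest => (pvKeys.any fun kw => kw.toList.isPrefixOf (c :: rest)) || pvScanB rest

def generate_instagram_hashtags_py_alt (text : String) : List String :=
  let t := PySem.Str.lower text
  let base := PySem.List.slice pvJp none (some 5) ++ PySem.List.slice pvEng none (some 5)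
  if pvScanB t.toList then
    PySem.List.slice (PySem.List.slice pvTech none (some 10) ++ base) none (some 25)
  else
    PySem.List.slice base none (some 25)

-- ===== PRECONDITION & SPEC =====
def Spec_generate_instagram_hashtags_py (text : String) (out : List String) : Prop := out = generate_instagram_hashtags_py_alt text
instance (text : String) (out : List String) : Decidable (Spec_generate_instagram_hashtags_py text out) := by unfold Spec_generate_instagram_hashtags_py; infer_instance

-- ===== CLAIM =====
def Claim_equal_generate_instagram_hashtags_py : Prop := ∀ (text : String), Dom_generate_instagram_hashtags_py text → Spec_generate_instagram_hashtags_py text (generate_instagram_hashtags_py text)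

-- ===== LEMMAS AND PROOFS =====

theorem pvLoopA_false (tl : String)
    (h : pvKeys.any (fun kw => PySem.Str.isIn kw tl) = false) :
    ∀ (l acc : List String), pvLoopA tl l acc = acc := by
  intro l
  induction l with
  | nil => intro acc; simp [pvLoopA]
  | cons x xs ih =>
    intro acc
    simp only [pvLoopA]
    rw [h]
    simp [ih]

theorem pvLoopA_true (tl : String)
    (h : pvKeys.any (fun kw => PySem.Str.isIn kw tl) = true) :
    ∀ (l acc : List String), acc.length < 10 →
      pvLoopA tl l acc = acc ++ l.take (10 - acc.length) := by
  intro l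
  induction l with
  | nil => intro acc _; simp [pvLoopA]
  | cons x xs ih =>
    intro acc hlen
    simp only [pvLoopA]
    rw [h]
    simp only [if_true]
    by_cases h10 : 10 ≤ (acc ++ [x]).length
    · rw [if_pos h10]
      have h9 : 10 - acc.length = 1 := by simp at h10; omega
      rw [h9]
      simp
    · rw [if_neg h10]
      rw [ih (acc ++ [x]) (by simp at h10 ⊢; omega)]
      have e : 10 - acc.length = (10 - (acc ++ [x]).length) + 1 := by
        simp at h10 ⊢; omega
      rw [e, List.take_succ_cons]
      simp

-- B's positional scan finds a keyword iff some keyword is an infix of the text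
theorem pvScanB_iff (s : List Char) :
    pvScanB s = true ↔ ∃ kw ∈ pvKeys, kw.toList <:+: s := by
  induction s with
  | nil =>
    simp only [pvScanB]
    constructor
    · intro h; exact absurd h (by decide)
    · rintro ⟨kw, hkw, hinf⟩
      have : kw.toList = [] := List.eq_nil_of_infix_nil hinf
      fin_cases hkw <;> simp_all
  | cons c rest ih =>
    simp only [pvScanB, Bool.or_eq_true, List.any_eq_true, ih]
    constructor
    · rintro (⟨kw, hkw, hp⟩ | ⟨kw, hkw, hinf⟩)
      · exact ⟨kw, hkw, ((List.isPrefixOf_iff_prefix).mp hp).isInfix⟩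
      · exact ⟨kw, hkw, hinf.trans (List.suffix_cons c rest).isInfix⟩
    · rintro ⟨kw, hkw, hinf⟩
      rcases (List.infix_cons_iff).mp hinf with hp | hinf'
      · exact Or.inl ⟨kw, hkw, (List.isPrefixOf_iff_prefix).mpr hp⟩
      · exact Or.inr ⟨kw, hkw, hinf'⟩

-- the two programs' match tests agree
theorem pvScanB_eq_any (tl : String) :
    pvScanB tl.toList = pvKeys.any (fun kw => PySem.Str.isIn kw tl) := by
  rw [Bool.eq_iff_iff, pvScanB_iff, List.any_eq_true]
  constructor
  · rintro ⟨kw, hkw, hinf⟩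
    exact ⟨kw, hkw, (PySem.Str.isIn_iff_infix kw tl).mpr hinf⟩
  · rintro ⟨kw, hkw, hin⟩
    exact ⟨kw, hkw, (PySem.Str.isIn_iff_infix kw tl).mp hin⟩

-- ===== VERDICT =====
set_option maxHeartbeats 2000000 in
theorem generate_instagram_hashtags_py_spec : Claim_equal_generate_instagram_hashtags_py := by
  intro text _
  unfold Spec_generate_instagram_hashtags_py
  unfold generate_instagram_hashtags_py generate_instagram_hashtags_py_alt
  dsimp only
  rw [pvScanB_eq_any]
  by_cases h : pvKeys.any (fun kw => PySem.Str.isIn kw (PySem.Str.lower text)) = true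
  · rw [pvLoopA_true _ h pvTech [] (by decide), h]
    decide
  · rw [pvLoopA_false _ (Bool.eq_false_iff.mpr h), Bool.eq_false_iff.mpr h]
    decide
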